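-- pv_equiv track=rewrite | github.com/Shubham-Choudhury/GeeksforGeeks-Problems | 2024 April/Sum of Products/main.py | pairAndSum
-- ===== SOURCE A (Python) =====
-- def pairAndSum(n, arr):
--     bit_counts, bit_and_sum = [0] * 32, 0
--     for a in arr:
--         for i in range(32):
--             mask = 1 << i
--             if a & mask:
--                 bit_and_sum += bit_counts[i] * mask
--                 bit_counts[i] += 1
--             elif mask > a:
--                 break
--     return bit_and_sum
-- ===== SOURCE B (Python) =====
-- def pairAndSum(n, arr):
--     counts = [0] * 32
--     for a in arr:
--         for i in range(32):
--             if (a >> i) & 1: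
--                 counts[i] += 1
--     total = 0
--     for i in range(32):
--         c = counts[i]
--         total += c * (c - 1) // 2 * (1 << i)
--     return total
-- ===== Notes on version B (the rewrite author's own statement) =====
-- stated objective: alternative
-- what changed: A fuses counting and pairwise accumulation in one pass with an early break per element; B first tallies per-bit set counts over the whole array, then aggregates in a separate pass with the C(count,2)*2^i closed form. Pre_ excludes lists containing a negative element, the problem's inputs are nonnegative and A's early `mask > a` break there counts only the trailing ones of a negative number, an artefact of its implementation.
-- outside the precondition, e.g. on pairAndSum(2, [-2, 3]): A returns 0, B returns 2
import Mathlib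
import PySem

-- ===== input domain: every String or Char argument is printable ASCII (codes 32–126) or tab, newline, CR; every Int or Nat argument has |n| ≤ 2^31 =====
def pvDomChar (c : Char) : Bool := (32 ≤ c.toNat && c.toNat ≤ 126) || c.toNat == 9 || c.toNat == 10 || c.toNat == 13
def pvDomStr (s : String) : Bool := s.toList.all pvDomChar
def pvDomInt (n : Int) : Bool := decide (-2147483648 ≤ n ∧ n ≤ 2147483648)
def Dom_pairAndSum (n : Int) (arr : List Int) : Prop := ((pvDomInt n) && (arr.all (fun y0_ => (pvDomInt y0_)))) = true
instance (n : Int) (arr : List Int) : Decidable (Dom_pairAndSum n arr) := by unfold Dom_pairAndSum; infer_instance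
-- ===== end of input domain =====

-- B replaces A's fused incremental pairwise accumulation (with per-element early break) by two
-- separate passes: per-bit set counting over the array, then a C(count,2)*2^i aggregation;
-- objective: alternative decomposition, not speed.

-- ===== PORT A =====
-- inner `for i in range(32)` loop of A, with its early `break`; state = (bit_counts, bit_and_sum)
def pvLoopA (a : Int) (counts : List Int) (s : Int) (i : Nat) : List Int × Int :=
  if h : i < 32 then
    let mask : Int := (1 : Int) <<< i
    if PySem.Int.band a mask ≠ 0 then
      pvLoopA a (counts.set i (counts.getD i 0 + 1)) (s + counts.getD i 0 * mask) (i + 1)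
    else if mask > a then (counts, s)
    else pvLoopA a counts s (i + 1)
  else (counts, s)
  termination_by 32 - i

def pairAndSum (n : Int) (arr : List Int) : Int :=
  (arr.foldl (fun st a => pvLoopA a st.1 st.2 0) (List.replicate 32 (0 : Int), (0 : Int))).2

-- ===== PORT B =====
-- `for i in range(32): if (a >> i) & 1: counts[i] += 1`
def pvCountB (a : Int) (counts : List Int) (i : Nat) : List Int :=
  if h : i < 32 then
    if PySem.Int.band (a >>> i) 1 ≠ 0 then pvCountB a (counts.set i (counts.getD i 0 + 1)) (i + 1)
    else pvCountB a counts (i + 1)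
  else counts
  termination_by 32 - i

def pairAndSum_alt (n : Int) (arr : List Int) : Int :=
  let counts := arr.foldl (fun c a => pvCountB a c 0) (List.replicate 32 (0 : Int))
  (List.range 32).foldl
    (fun s i => s + PySem.Int.floordiv (counts.getD i 0 * (counts.getD i 0 - 1)) 2 * ((1 : Int) <<< i)) 0

-- ===== PRECONDITION & SPEC =====
-- Pre_ restricts to the problem's natural domain of nonnegative integers: on a list containing a
-- negative element A still returns a value, but its `mask > a` break then counts only the trailing
-- ones of that element, an artefact of A's implementation, while B counts its 32 low bits.
def Pre_pairAndSum (n : Int) (arr : List Int) : Prop := ∀ x ∈ arr, 0 ≤ x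
instance (n : Int) (arr : List Int) : Decidable (Pre_pairAndSum n arr) := by unfold Pre_pairAndSum; infer_instance
def pvWitness_pairAndSum : Int × List Int := (3, [5, 3, 7])

def Spec_pairAndSum (n : Int) (arr : List Int) (out : Int) : Prop := out = pairAndSum_alt n arr
instance (n : Int) (arr : List Int) (out : Int) : Decidable (Spec_pairAndSum n arr out) := by unfold Spec_pairAndSum; infer_instance

-- ===== CLAIM (what is proved, stated in full; the proofs are below) =====
def Claim_equal_pairAndSum : Prop := ∀ (n : Int) (arr : List Int), Dom_pairAndSum n arr → Pre_pairAndSum n arr → Spec_pairAndSum n arr (pairAndSum n arr)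

-- ===== LEMMAS AND PROOFS =====

-- B's inner count loop, carrying A's pairwise accumulator alongside: bridge between the two ports
def pvRunB (a : Int) (c : List Int) (s : Int) (i : Nat) : List Int × Int :=
  if h : i < 32 then
    if PySem.Int.band (a >>> i) 1 ≠ 0 then
      pvRunB a (c.set i (c.getD i 0 + 1)) (s + c.getD i 0 * ((1 : Int) <<< i)) (i + 1)
    else pvRunB a c s (i + 1)
  else (c, s)
  termination_by 32 - i

def pvPhi (c : List Int) : Int :=
  ∑ i ∈ Finset.range 32, PySem.Int.floordiv (c.getD i 0 * (c.getD i 0 - 1)) 2 * 2 ^ i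

lemma pv_shl_one (i : Nat) : ((1 : Int) <<< i) = ((2 ^ i : Nat) : Int) := by
  show Int.shiftLeft 1 i = _
  unfold Int.shiftLeft
  norm_num [Nat.shiftLeft_eq]

lemma pv_band_one (n i : Nat) : (PySem.Int.band ((n : Int) >>> i) 1 ≠ 0) ↔ n.testBit i = true := by
  have h1 : ((n : Int) >>> i) = ((n >>> i : Nat) : Int) := (Int.natCast_shiftRight n i).symm
  rw [h1]
  have : PySem.Int.band ((n >>> i : Nat) : Int) 1 = (((n >>> i) &&& 1 : Nat) : Int) := by
    simpa using PySem.Int.band_natCast (n >>> i) 1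
  rw [this]
  simp [Nat.testBit, Nat.and_comm]
  omega

lemma pv_band_pow (a : Int) (ha : 0 ≤ a) (i : Nat) :
    (PySem.Int.band a ((1 : Int) <<< i) ≠ 0) ↔ a.toNat.testBit i = true := by
  rw [pv_shl_one]
  unfold PySem.Int.band
  rw [if_pos ha, if_pos (by positivity)]
  rw [Int.toNat_natCast, Nat.and_two_pow]
  rcases Bool.eq_false_or_eq_true (a.toNat.testBit i) with h | h <;> simp [h]

lemma pv_runB_test (a : Int) (ha : 0 ≤ a) (i : Nat) :
    (PySem.Int.band (a >>> i) 1 ≠ 0) ↔ a.toNat.testBit i = true := by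
  have h := pv_band_one a.toNat i
  rw [Int.toNat_of_nonneg ha] at h
  exact h

lemma pv_runB_id (a : Int) (ha : 0 ≤ a)
    (c : List Int) (s : Int) (i : Nat)
    (h : ∀ j, i ≤ j → a.toNat.testBit j = false) :
    pvRunB a c s i = (c, s) := by
  suffices hk : ∀ k i, 32 - i ≤ k → (∀ j, i ≤ j → a.toNat.testBit j = false) →
      pvRunB a c s i = (c, s) by
    exact hk 32 i (by omega) h
  intro k
  induction k with
  | zero =>
    intro i hk h
    rw [pvRunB, dif_neg (by omega)]
  | succ k ih =>
    intro i hk h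
    by_cases h32 : i < 32
    · rw [pvRunB, dif_pos h32]
      rw [if_neg (by simp [pv_runB_test a ha i, h i (le_refl i)])]
      exact ih (i + 1) (by omega) (fun j hj => h j (by omega))
    · rw [pvRunB, dif_neg h32]

lemma pv_loopA_eq_runB (a : Int) (ha : 0 ≤ a) (i : Nat) (c : List Int) (s : Int) :
    pvLoopA a c s i = pvRunB a c s i := by
  suffices hk : ∀ k i c s, 32 - i ≤ k → pvLoopA a c s i = pvRunB a c s i by
    exact hk 32 i c s (by omega)
  intro k
  induction k with
  | zero =>
    intro i c s hk
    rw [pvLoopA, pvRunB, dif_neg (by omega), dif_neg (by omega)]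
  | succ k ih =>
    intro i c s hk
    by_cases h32 : i < 32
    · rw [pvLoopA, dif_pos h32]
      by_cases hb : PySem.Int.band a ((1 : Int) <<< i) ≠ 0
      · have hbit : a.toNat.testBit i = true := (pv_band_pow a ha i).1 hb
        rw [if_pos hb]
        rw [pvRunB, dif_pos h32, if_pos ((pv_runB_test a ha i).2 hbit)]
        exact ih (i + 1) _ _ (by omega)
      · have hbit : a.toNat.testBit i = false := by
          rcases Bool.eq_false_or_eq_true (a.toNat.testBit i) with h' | h'
          · exact absurd ((pv_band_pow a ha i).2 h') hb
          · exact h'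
        by_cases hgt : (1 : Int) <<< i > a
        · rw [if_neg hb, if_pos hgt]
          symm
          apply pv_runB_id a ha c s i
          intro j hij
          rcases Nat.eq_or_lt_of_le hij with heq | hlt
          · rw [← heq]; exact hbit
          · apply Nat.testBit_lt_two_pow
            rw [pv_shl_one] at hgt
            calc a.toNat < 2 ^ i := by omega
            _ ≤ 2 ^ j := Nat.pow_le_pow_right (by omega) (by omega)
        · rw [if_neg hb, if_neg hgt]
          rw [pvRunB, dif_pos h32, if_neg (by simp [pv_runB_test a ha i, hbit])]
          exact ih (i + 1) _ _ (by omega)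
    · rw [pvLoopA, pvRunB, dif_neg h32, dif_neg h32]

lemma pv_runB_fst (a : Int) (c : List Int) (s : Int) (i : Nat) :
    (pvRunB a c s i).1 = pvCountB a c i := by
  suffices hk : ∀ k i c s, 32 - i ≤ k → (pvRunB a c s i).1 = pvCountB a c i by
    exact hk 32 i c s (by omega)
  intro k
  induction k with
  | zero => intro i c s hk; rw [pvRunB, pvCountB, dif_neg (by omega), dif_neg (by omega)]
  | succ k ih =>
    intro i c s hk
    by_cases h32 : i < 32
    · rw [pvRunB, pvCountB, dif_pos h32, dif_pos h32]
      by_cases hb : PySem.Int.band (a >>> i) 1 ≠ 0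
      · rw [if_pos hb, if_pos hb]; exact ih _ _ _ (by omega)
      · rw [if_neg hb, if_neg hb]; exact ih _ _ _ (by omega)
    · rw [pvRunB, pvCountB, dif_neg h32, dif_neg h32]

lemma pv_fd2 (k : Int) : PySem.Int.floordiv (2 * k) 2 = k := by
  rw [PySem.Int.floordiv_eq_iff_of_pos (by omega)]
  omega

lemma pv_consec_even (g : Int) : ∃ k, g * (g - 1) = 2 * k := by
  rcases Int.even_or_odd g with ⟨k, hk⟩ | ⟨k, hk⟩
  · exact ⟨k * (g - 1), by rw [hk]; ring⟩
  · exact ⟨g * k, by rw [hk]; ring⟩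

lemma pv_fterm_succ (g : Int) :
    PySem.Int.floordiv ((g + 1) * g) 2 = PySem.Int.floordiv (g * (g - 1)) 2 + g := by
  obtain ⟨k, hk⟩ := pv_consec_even g
  have h1 : (g + 1) * g = 2 * (k + g) := by nlinarith [hk]
  rw [hk, h1, pv_fd2, pv_fd2]

lemma pv_phi_bump (c : List Int) (i : Nat) (hi : i < 32) :
    pvPhi (c.set i (c.getD i 0 + 1)) = pvPhi c + c.getD i 0 * 2 ^ i := by
  unfold pvPhi
  have hterm : ∀ j ∈ Finset.range 32,
      PySem.Int.floordiv ((c.set i (c.getD i 0 + 1)).getD j 0 * ((c.set i (c.getD i 0 + 1)).getD j 0 - 1)) 2 * 2 ^ j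
      = PySem.Int.floordiv (c.getD j 0 * (c.getD j 0 - 1)) 2 * 2 ^ j
        + (if j = i then c.getD i 0 * 2 ^ i else 0) := by
    intro j hj
    by_cases hji : j = i
    · subst hji
      by_cases hlen : j < c.length
      · rw [show (c.set j (c.getD j 0 + 1)).getD j 0 = c.getD j 0 + 1 from by
            simp [List.getD_eq_getElem?_getD, hlen]]
        rw [if_pos rfl]
        rw [show c.getD j 0 + 1 - 1 = c.getD j 0 from by ring, pv_fterm_succ (c.getD j 0)]
        ring
      · rw [List.set_eq_of_length_le (by omega)]
        rw [if_pos rfl]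
        rw [List.getD_eq_default _ _ (by omega)]
        norm_num
    · rw [show (c.set i (c.getD i 0 + 1)).getD j 0 = c.getD j 0 from by
          simp [List.getD_eq_getElem?_getD, List.getElem?_set_ne (by omega : i ≠ j)]]
      rw [if_neg hji]
      ring
  rw [Finset.sum_congr rfl hterm, Finset.sum_add_distrib, Finset.sum_ite_eq' (Finset.range 32)]
  rw [if_pos (Finset.mem_range.mpr hi)]

lemma pv_runB_snd (a : Int) (c : List Int) (s : Int) (i : Nat) :
    (pvRunB a c s i).2 + pvPhi c = s + pvPhi (pvRunB a c s i).1 := by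
  suffices hk : ∀ k i c s, 32 - i ≤ k →
      (pvRunB a c s i).2 + pvPhi c = s + pvPhi (pvRunB a c s i).1 by
    exact hk 32 i c s (by omega)
  intro k
  induction k with
  | zero => intro i c s hk; rw [pvRunB, dif_neg (by omega)]
  | succ k ih =>
    intro i c s hk
    by_cases h32 : i < 32
    · rw [pvRunB, dif_pos h32]
      by_cases hb : PySem.Int.band (a >>> i) 1 ≠ 0
      · rw [if_pos hb]
        have hthis := ih (i + 1) (c.set i (c.getD i 0 + 1)) (s + c.getD i 0 * ((1 : Int) <<< i)) (by omega)
        rw [pv_phi_bump c i h32] at hthis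
        have hp : c.getD i 0 * ((1 : Int) <<< i) = c.getD i 0 * 2 ^ i := by
          rw [pv_shl_one]; push_cast; ring
        omega
      · rw [if_neg hb]
        exact ih (i + 1) c s (by omega)
    · rw [pvRunB, dif_neg h32]

lemma pv_fold_snd (arr : List Int) (hpos : ∀ x ∈ arr, 0 ≤ x) : ∀ st : List Int × Int,
    (arr.foldl (fun st a => pvLoopA a st.1 st.2 0) st).2 + pvPhi st.1
      = st.2 + pvPhi (arr.foldl (fun c a => pvCountB a c 0) st.1) := by
  induction arr with
  | nil => intro st; rfl
  | cons a arr ih =>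
    intro st
    simp only [List.foldl_cons]
    rw [pv_loopA_eq_runB a (hpos a (by simp)) 0 st.1 st.2]
    have hih := ih (fun x hx => hpos x (by simp [hx])) (pvRunB a st.1 st.2 0)
    have hsnd := pv_runB_snd a st.1 st.2 0
    rw [pv_runB_fst] at hih
    rw [pv_runB_fst] at hsnd
    omega

lemma pv_foldl_range_add (h : Nat → Int) (n : Nat) (s : Int) :
    (List.range n).foldl (fun s i => s + h i) s = s + ∑ i ∈ Finset.range n, h i := by
  induction n generalizing s with
  | zero => simp
  | succ n ih =>
    rw [List.range_succ, List.foldl_append, ih, Finset.sum_range_succ]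
    simp [add_assoc]

lemma pv_alt_phi (n : Int) (arr : List Int) :
    pairAndSum_alt n arr
      = pvPhi (arr.foldl (fun c a => pvCountB a c 0) (List.replicate 32 (0 : Int))) := by
  unfold pairAndSum_alt
  set counts := arr.foldl (fun c a => pvCountB a c 0) (List.replicate 32 (0 : Int)) with hc
  rw [pv_foldl_range_add
    (fun i => PySem.Int.floordiv (counts.getD i 0 * (counts.getD i 0 - 1)) 2 * ((1 : Int) <<< i)) 32 0]
  rw [zero_add]
  unfold pvPhi
  refine Finset.sum_congr rfl (fun i _ => ?_)
  rw [pv_shl_one]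
  push_cast
  ring

lemma pv_phi_zero : pvPhi (List.replicate 32 (0 : Int)) = 0 := by
  unfold pvPhi
  apply Finset.sum_eq_zero
  intro i hi
  have hrep : ∀ (n i : Nat), (List.replicate n (0 : Int)).getD i 0 = 0 := by
    intro n
    induction n with
    | zero => intro i; rfl
    | succ n ih =>
      intro i
      cases i with
      | zero => rfl
      | succ i => simp only [List.replicate_succ, List.getD_cons_succ]; exact ih i
  rw [hrep]
  have : PySem.Int.floordiv (0 * (0 - 1)) 2 = 0 := by
    rw [show (0 : Int) * (0 - 1) = 2 * 0 from by ring, pv_fd2]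
  rw [this, zero_mul]

-- ===== VERDICT (by name: the statement is the Claim_ definition above) =====
theorem pairAndSum_spec : Claim_equal_pairAndSum := by
  intro n arr _ hpre
  unfold Spec_pairAndSum pairAndSum
  rw [pv_alt_phi]
  have h := pv_fold_snd arr hpre (List.replicate 32 (0 : Int), (0 : Int))
  rw [show ((List.replicate 32 (0 : Int), (0 : Int)) : List Int × Int).1 = List.replicate 32 (0 : Int) from rfl,
    show ((List.replicate 32 (0 : Int), (0 : Int)) : List Int × Int).2 = (0 : Int) from rfl,
    pv_phi_zero] at h
  omega
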